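-- pv_equiv track=rewrite | github.com/alanyon/First-guess-TAFs---IMPROVER-ML | bases_changes/bases.py | shorten_gusts
-- ===== SOURCE A (Python) =====
-- def shorten_gusts(wind_gusts):
--     """
--     Shortens collections of wind gusts to the point in which there are
--     no significant differences.
--
--     Args:
--         wind_gusts (Pandas.Series): Wind gusts
--     Returns:
--         wind_gusts (Pandas.Series): Shortened wind gusts
--     """
--     # Start with default of sig difference and update as necessary
--     sig_diff = True
--     while sig_diff:
--
--         # Do not do anything if 1 or 0 values
--         if len(wind_gusts) <= 1:
--             return wind_gusts
--
--         # Get wind mean differences between every pair of values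
--         max_diff = max(wind_gusts) - min(wind_gusts)
--
--         # Remove last wind mean if max difference >= 10kt and move to
--         # next iteration
--         if max_diff >= 10:
--             wind_gusts = wind_gusts[:-1]
--
--         # Otherwise, end while loop
--         else:
--             sig_diff = False
--
--     return wind_gusts
-- ===== SOURCE B (Python) =====
-- def shorten_gusts(wind_gusts):
--     """One forward pass with a running min/max: collect the longest prefix
--     whose max-min spread stays below 10kt (O(n) instead of A's O(n^2))."""
--     out = []
--     lo = hi = None
--     for g in wind_gusts:
--         lo = g if lo is None else min(lo, g)
--         hi = g if hi is None else max(hi, g)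
--         if hi - lo >= 10:
--             break
--         out.append(g)
--     return out
-- ===== Notes on version B (the rewrite author's own statement) =====
-- stated objective: faster
-- what changed: A repeatedly rescans the whole remaining prefix with max()/min() and chops one element per iteration; B makes a single forward pass with a running min/max and collects the longest prefix whose spread stays below 10kt.
import Mathlib
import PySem

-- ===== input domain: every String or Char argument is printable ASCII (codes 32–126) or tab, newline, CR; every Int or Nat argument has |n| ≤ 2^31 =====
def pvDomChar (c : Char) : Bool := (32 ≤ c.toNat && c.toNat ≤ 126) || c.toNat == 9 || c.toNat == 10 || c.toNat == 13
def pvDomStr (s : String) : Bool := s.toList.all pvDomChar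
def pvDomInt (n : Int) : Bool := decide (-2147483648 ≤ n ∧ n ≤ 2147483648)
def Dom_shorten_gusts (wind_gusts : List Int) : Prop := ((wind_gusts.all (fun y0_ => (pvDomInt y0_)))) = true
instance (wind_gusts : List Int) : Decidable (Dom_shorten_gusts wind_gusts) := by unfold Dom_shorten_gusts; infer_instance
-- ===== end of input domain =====

-- B replaces A's repeated full-prefix max/min scans by one forward pass with a running min/max; objective: faster (asymptotic).

-- ===== PORT A =====
-- A's while loop: each iteration either returns (len ≤ 1 or spread < 10) or drops the
-- last element (wind_gusts[:-1]); ported as well-founded recursion on the list length.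
-- max(ws)/min(ws): PySem.List.max?/min? with `.getD 0` — the default is unreachable
-- since the branch has ws.length > 1 (Python's max/min raise only on empty input).
def shorten_gusts (wind_gusts : List Int) : List Int :=
  if wind_gusts.length ≤ 1 then wind_gusts
  else
    let max_diff := (PySem.List.max? wind_gusts (fun y => y)).getD 0
                    - (PySem.List.min? wind_gusts (fun y => y)).getD 0
    if max_diff ≥ 10 then
      shorten_gusts (PySem.List.slice wind_gusts none (some (-1)))
    else
      wind_gusts
termination_by wind_gusts.length
decreasing_by
  rw [PySem.List.slice_to_neg_one]
  rename_i h _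
  have := wind_gusts.length_dropLast
  omega

-- ===== PORT B =====
-- B's loop: running lo/hi start as None; each element updates them, a spread ≥ 10
-- stops the loop, otherwise the element is appended to the output prefix.
def shortenGustsGo (lo hi : Option Int) : List Int → List Int
  | [] => []
  | g :: rest =>
    let lo' := match lo with | none => g | some l => min l g
    let hi' := match hi with | none => g | some h => max h g
    if hi' - lo' ≥ 10 then [] else g :: shortenGustsGo (some lo') (some hi') rest

def shorten_gusts_alt (wind_gusts : List Int) : List Int :=
  shortenGustsGo none none wind_gusts

-- ===== PRECONDITION & SPEC =====
def Spec_shorten_gusts (wind_gusts : List Int) (out : List Int) : Prop := out = shorten_gusts_alt wind_gusts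
instance (wind_gusts : List Int) (out : List Int) : Decidable (Spec_shorten_gusts wind_gusts out) := by unfold Spec_shorten_gusts; infer_instance

-- ===== CLAIM (what is proved, stated in full; the proofs are below) =====
def Claim_equal_shorten_gusts : Prop := ∀ (wind_gusts : List Int), Dom_shorten_gusts wind_gusts → Spec_shorten_gusts wind_gusts (shorten_gusts wind_gusts)

-- ===== LEMMAS AND PROOFS =====

theorem shortenGustsGo_cons (l h g : Int) (rest : List Int) :
    shortenGustsGo (some l) (some h) (g :: rest)
      = if max h g - min l g ≥ 10 then []
        else g :: shortenGustsGo (some (min l g)) (some (max h g)) rest := rfl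

-- If the overall spread (running max/min seeded with h/l over rest) stays below 10,
-- B's loop never breaks and returns the whole remaining list.
theorem shortenGustsGo_all (l h : Int) (rest : List Int)
    (hlt : rest.foldl max h - rest.foldl min l < 10) :
    shortenGustsGo (some l) (some h) rest = rest := by
  induction rest generalizing l h with
  | nil => rfl
  | cons g t ih =>
    simp only [List.foldl] at hlt
    have hmx := PySem.List.le_foldl_max t (max h g)
    have hmn := PySem.List.foldl_min_le t (min l g)
    simp only [shortenGustsGo]
    rw [if_neg (by omega)]
    rw [ih _ _ hlt]

-- If the overall spread is ≥ 10, B's loop never reaches the last element: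
-- dropping it does not change the result.
theorem shortenGustsGo_dropLast (l h : Int) (rest : List Int)
    (hge : rest.foldl max h - rest.foldl min l ≥ 10) :
    shortenGustsGo (some l) (some h) rest = shortenGustsGo (some l) (some h) rest.dropLast := by
  induction rest generalizing l h with
  | nil => rfl
  | cons g t ih =>
    simp only [List.foldl] at hge
    by_cases hviol : max h g - min l g ≥ 10
    · cases t with
      | nil => simp [shortenGustsGo, hviol]
      | cons a t' => simp [shortenGustsGo, hviol]
    · cases t with
      | nil => simp only [List.foldl] at hge; omega
      | cons a t' =>
        have hd : (g :: a :: t').dropLast = g :: (a :: t').dropLast := rfl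
        rw [hd, shortenGustsGo_cons l h g (a :: t'),
          shortenGustsGo_cons l h g ((a :: t').dropLast), if_neg hviol, if_neg hviol,
          ih _ _ hge]

theorem shorten_gusts_eq_alt (ws : List Int) : shorten_gusts ws = shorten_gusts_alt ws := by
  induction hn : ws.length using Nat.strong_induction_on generalizing ws with
  | _ n ih =>
  cases ws with
  | nil => simp [shorten_gusts, shorten_gusts_alt, shortenGustsGo]
  | cons g rest =>
    cases rest with
    | nil =>
      simp [shorten_gusts, shorten_gusts_alt, shortenGustsGo]
    | cons a t =>
      rw [shorten_gusts]
      have hlen : ¬ (g :: a :: t).length ≤ 1 := by simp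
      rw [if_neg hlen]
      rw [PySem.List.max?_id_cons, PySem.List.min?_id_cons]
      simp only [Option.getD_some]
      have halt : shorten_gusts_alt (g :: a :: t)
          = g :: shortenGustsGo (some g) (some g) (a :: t) := by
        simp [shorten_gusts_alt, shortenGustsGo]
      by_cases hge : (a :: t).foldl max g - (a :: t).foldl min g ≥ 10
      · rw [if_pos hge, PySem.List.slice_to_neg_one]
        have hdl : (g :: a :: t).dropLast = g :: (a :: t).dropLast := rfl
        have hlt' : ((g :: a :: t).dropLast).length < n := by
          have := (g :: a :: t).length_dropLast
          omega
        rw [ih _ hlt' _ rfl, halt]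
        rw [shortenGustsGo_dropLast _ _ _ hge, hdl]
        simp [shorten_gusts_alt, shortenGustsGo]
      · rw [if_neg hge, halt]
        rw [shortenGustsGo_all _ _ _ (by omega)]

-- ===== VERDICT (by name: the statement is the Claim_ definition above) =====
theorem shorten_gusts_spec : Claim_equal_shorten_gusts := by
  intro ws _
  unfold Spec_shorten_gusts
  exact shorten_gusts_eq_alt ws
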